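-- pv_equiv track=rewrite | github.com/juliandiaz2-bug/Algoritmia-y-programacion | Funciones/Punto2.py | procesar_lista
-- ===== SOURCE A (Python) =====
-- def procesar_lista(lista):
--     """
--     Filtra los números pares de una lista y los eleva al cuadrado usando recursión.
--
--     La función recorre la lista elemento por elemento; si el número es par,
--     lo eleva al cuadrado y lo añade a la lista resultante. Si es impar,
--     lo ignora.
--
--     Entradas:
--         lista (list): Una secuencia de números enteros.
--
--     Retorna:
--         list: Una nueva lista que contiene solo los cuadrados de los números pares originales.
--     """
--     if not lista:
--         return []
--     primero=lista[0]
--     resto=procesar_lista(lista[1:])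
--     if primero % 2 == 0:
--         return [primero**2] + resto
--     else:
--         return resto
-- ===== SOURCE B (Python) =====
-- def procesar_lista(lista):
--     resultado = []
--     for n in lista:
--         if n % 2 == 0:
--             resultado.append(n**2)
--     return resultado
-- ===== Notes on version B (the rewrite author's own statement) =====
-- stated objective: simpler
-- what changed: Replaces the slice-based recursion (which copies the tail at every step) with a single iterative accumulator loop appending squares of even elements.
import Mathlib
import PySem

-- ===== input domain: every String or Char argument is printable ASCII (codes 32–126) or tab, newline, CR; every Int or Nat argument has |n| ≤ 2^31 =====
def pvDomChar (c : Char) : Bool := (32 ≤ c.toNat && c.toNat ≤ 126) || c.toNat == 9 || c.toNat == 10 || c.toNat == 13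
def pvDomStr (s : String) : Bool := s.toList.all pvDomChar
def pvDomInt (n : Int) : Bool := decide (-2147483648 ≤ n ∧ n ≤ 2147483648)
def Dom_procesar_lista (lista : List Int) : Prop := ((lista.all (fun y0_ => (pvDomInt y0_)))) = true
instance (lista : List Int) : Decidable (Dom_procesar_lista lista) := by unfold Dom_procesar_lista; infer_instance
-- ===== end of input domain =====

-- B replaces A's slice-based recursion with a single iterative accumulator loop (simpler, linear).


-- ===== PORT A =====
-- recursion on the list: empty → [], else recurse on the tail and prepend the square if even
def procesar_lista (lista : List Int) : List Int :=
  match lista with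
  | [] => []
  | primero :: restoL =>
    let resto := procesar_lista restoL
    if PySem.Int.mod primero 2 == 0 then [primero ^ 2] ++ resto else resto

-- ===== PORT B =====
-- iterative accumulator loop: for n in lista: if n % 2 == 0: resultado.append(n**2)
def procesar_lista_alt (lista : List Int) : List Int :=
  lista.foldl (fun resultado n =>
    if PySem.Int.mod n 2 == 0 then resultado ++ [n ^ 2] else resultado) []

-- ===== PRECONDITION & SPEC =====
def Spec_procesar_lista (lista : List Int) (out : List Int) : Prop := out = procesar_lista_alt lista
instance (lista : List Int) (out : List Int) : Decidable (Spec_procesar_lista lista out) := by unfold Spec_procesar_lista; infer_instance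

-- ===== CLAIM (what is proved, stated in full; the proofs are below) =====
def Claim_equal_procesar_lista : Prop := ∀ (lista : List Int), Dom_procesar_lista lista → Spec_procesar_lista lista (procesar_lista lista)

-- ===== LEMMAS AND PROOFS =====
theorem procesar_lista_eq_filter_map (lista : List Int) :
    procesar_lista lista
      = (lista.filter (fun n => PySem.Int.mod n 2 == 0)).map (fun n => n ^ 2) := by
  induction lista with
  | nil => rfl
  | cons h t ih =>
    simp only [procesar_lista, ih, List.filter_cons]
    cases hp : (PySem.Int.mod h 2 == 0) <;>
      simp only [hp, if_true, if_false, Bool.false_eq_true, List.map_cons, List.singleton_append]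

-- ===== VERDICT (by name: the statement is the Claim_ definition above) =====
theorem procesar_lista_spec : Claim_equal_procesar_lista := by
  intro lista _
  unfold Spec_procesar_lista procesar_lista_alt
  rw [PySem.List.foldl_append_if, procesar_lista_eq_filter_map]
  rfl
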